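-- pv_equiv track=rewrite | github.com/agconti/US_Dollar_Vehicle_Currency | notebook/venv/lib/python2.7/site-packages/pandas/core/format.py | _get_level_lengths
-- ===== SOURCE A (Python) =====
-- def _get_level_lengths(levels,sentinal=''):
--     from itertools import groupby
--
--     def _make_grouper():
--         record = {'count': 0}
--
--         def grouper(x):
--             if x != sentinal:
--                 record['count'] += 1
--             return record['count']
--         return grouper
--
--     result = []
--     for lev in levels:
--         i = 0
--         f = _make_grouper()
--         recs = {}
--         for key, gpr in groupby(lev, f):
--             values = list(gpr)
--             recs[i] = len(values)
--             i += len(values)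
--
--         result.append(recs)
--
--     return result
-- ===== SOURCE B (Python) =====
-- def _get_level_lengths(levels, sentinal=''):
--     result = []
--     for lev in levels:
--         recs = {}
--         start = 0
--         for i, x in enumerate(lev):
--             if i > 0 and x != sentinal:
--                 recs[start] = i - start
--                 start = i
--         if lev:
--             recs[start] = len(lev) - start
--         result.append(recs)
--     return result
-- ===== Notes on version B (the rewrite author's own statement) =====
-- stated objective: simpler
-- what changed: Replaces itertools.groupby with a stateful grouper closure by a single enumerate pass per level that tracks the current run's start index and closes a run whenever a non-sentinel element appears past position 0.
import Mathlib
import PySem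

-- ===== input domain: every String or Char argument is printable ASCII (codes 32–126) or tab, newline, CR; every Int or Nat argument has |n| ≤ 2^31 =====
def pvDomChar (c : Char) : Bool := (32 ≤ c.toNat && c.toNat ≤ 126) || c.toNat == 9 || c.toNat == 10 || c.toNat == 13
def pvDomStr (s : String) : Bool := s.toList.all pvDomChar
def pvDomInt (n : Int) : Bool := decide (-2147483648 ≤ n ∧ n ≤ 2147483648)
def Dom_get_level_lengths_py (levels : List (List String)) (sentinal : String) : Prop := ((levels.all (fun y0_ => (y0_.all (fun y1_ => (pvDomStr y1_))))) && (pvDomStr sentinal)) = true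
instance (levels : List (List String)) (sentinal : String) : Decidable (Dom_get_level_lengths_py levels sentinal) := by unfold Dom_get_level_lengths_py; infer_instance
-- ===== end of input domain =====

-- B replaces itertools.groupby with its stateful grouper closure by one plain
-- enumerate pass per level tracking the current run's start index (objective: simpler).

-- ===== PORT A =====
-- itertools.groupby(lev, grouper) where grouper increments its count on every
-- non-sentinel element: the key changes exactly at non-sentinel elements past the
-- first element, so each group is one element followed by the maximal run of
-- sentinels. Ported by hand (PySem has no groupby); exact for this key function.
def pvGroupsA (lev : List String) (sentinal : String) : List (List String) :=
  match lev with
  | [] => []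
  | x :: xs =>
    (x :: xs.takeWhile (fun y => y == sentinal)) ::
      pvGroupsA (xs.dropWhile (fun y => y == sentinal)) sentinal
termination_by lev.length
decreasing_by
  have := List.length_dropWhile_le (fun y => y == sentinal) xs
  simp; omega

-- loop body: recs[i] = len(values); i += len(values)
def pvStepA (st : Int × PySem.Dict Int Int) (g : List String) : Int × PySem.Dict Int Int :=
  (st.1 + (g.length : Int), st.2.insert st.1 (g.length : Int))

def get_level_lengths_py (levels : List (List String)) (sentinal : String) : List (List (Int × Int)) :=
  levels.map (fun lev =>
    (((pvGroupsA lev sentinal).foldl pvStepA (0, PySem.Dict.empty)).2).items)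

-- ===== PORT B =====
-- loop body: if i > 0 and x != sentinal: recs[start] = i - start; start = i
def pvStepB (sentinal : String) (p : PySem.Dict Int Int × Int) (ix : Int × String) : PySem.Dict Int Int × Int :=
  if 0 < ix.1 ∧ ix.2 ≠ sentinal then (p.1.insert p.2 (ix.1 - p.2), ix.1) else p

def get_level_lengths_py_alt (levels : List (List String)) (sentinal : String) : List (List (Int × Int)) :=
  levels.map (fun lev =>
    let p := (PySem.List.enumerate lev 0).foldl (pvStepB sentinal) (PySem.Dict.empty, 0)
    if lev.isEmpty then p.1.items
    else (p.1.insert p.2 ((lev.length : Int) - p.2)).items)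

-- ===== PRECONDITION & SPEC =====
def Spec_get_level_lengths_py (levels : List (List String)) (sentinal : String) (out : List (List (Int × Int))) : Prop := out = get_level_lengths_py_alt levels sentinal
instance (levels : List (List String)) (sentinal : String) (out : List (List (Int × Int))) : Decidable (Spec_get_level_lengths_py levels sentinal out) := by unfold Spec_get_level_lengths_py; infer_instance

-- ===== CLAIM (what is proved, stated in full; the proofs are below) =====
def Claim_equal_get_level_lengths_py : Prop := ∀ (levels : List (List String)) (sentinal : String), Dom_get_level_lengths_py levels sentinal → Spec_get_level_lengths_py levels sentinal (get_level_lengths_py levels sentinal)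

-- ===== LEMMAS AND PROOFS =====

-- folding B's step over an all-sentinel stretch is the identity
theorem pv_fold_sent (s : String) (l : List String) (hl : ∀ y ∈ l, y = s) :
    ∀ (j : Int) (p : PySem.Dict Int Int × Int),
      (PySem.List.enumerate l j).foldl (pvStepB s) p = p := by
  induction l with
  | nil => intro j p; simp [PySem.List.enumerate_nil]
  | cons y ys ih =>
    intro j p
    have hy : y = s := hl y (by simp)
    have hys : ∀ z ∈ ys, z = s := fun z hz => hl z (by simp [hz])
    simp [PySem.List.enumerate_cons, pvStepB, hy, ih hys]

-- head of dropWhile fails the predicate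
theorem pv_head_dropWhile {α : Type} (p : α → Bool) (l : List α) :
    ∀ y, (l.dropWhile p).head? = some y → p y = false := by
  induction l with
  | nil => intro y h; simp [List.dropWhile] at h
  | cons x xs ih =>
    intro y h
    by_cases hx : p x
    · exact ih y (by simpa [List.dropWhile, hx] using h)
    · simp [List.dropWhile, hx] at h
      subst h; simpa using hx

-- main invariant: after the pending run (start = st, opened before index i),
-- B's remaining pass plus its final insert equals A's fold over the remaining
-- groups with the pending run already recorded.
theorem pv_main (s : String) :
    ∀ (rest : List String), (∀ y, rest.head? = some y → y ≠ s) →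
    ∀ (i st : Int) (d : PySem.Dict Int Int), 0 < i → st < i → (∀ k ∈ d.keys, k < st) →
      (let p := (PySem.List.enumerate rest i).foldl (pvStepB s) (d, st)
       (p.1.insert p.2 ((i + rest.length) - p.2)).items)
      = (((pvGroupsA rest s).foldl pvStepA (i, d.insert st (i - st))).2).items := by
  intro rest
  induction rest using pvGroupsA.induct (sentinal := s) with
  | case1 => intro _ i st d _ _ _; simp [pvGroupsA]
  | case2 x xs ih =>
    intro hhead i st d hi hst hkeys
    have hx : x ≠ s := hhead x (by simp)
    set t := xs.takeWhile (fun y => y == s) with ht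
    set r := xs.dropWhile (fun y => y == s) with hr
    have hsent : ∀ y ∈ t, y = s := by
      intro y hy; have := List.mem_takeWhile_imp hy; simpa using this
    have hsplit : t ++ r = xs := List.takeWhile_append_dropWhile
    have hl2 : xs.length = t.length + r.length := by
      rw [← hsplit, List.length_append]
    have e2 : PySem.List.enumerate xs (i + 1)
        = PySem.List.enumerate t (i + 1) ++ PySem.List.enumerate r (i + 1 + t.length) := by
      conv_lhs => rw [← hsplit]
      rw [PySem.List.enumerate_append]
    have stepx : pvStepB s (d, st) (i, x) = (d.insert st (i - st), i) := by
      simp [pvStepB, hi, hx]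
    have hkeys' : ∀ k ∈ (d.insert st (i - st)).keys, k < i := by
      intro k hk
      rcases (PySem.Dict.mem_keys_insert _ _ _ _).1 hk with h | h
      · omega
      · exact lt_trans (hkeys k h) hst
    have hhead' : ∀ y, r.head? = some y → y ≠ s := by
      intro y hy
      have := pv_head_dropWhile (fun y => y == s) xs y (by simpa [hr] using hy)
      simpa using this
    have hmain := ih hhead' (i + 1 + t.length) i (d.insert st (i - st))
      (by omega) (by omega) hkeys'
    have hga : pvGroupsA (x :: xs) s = (x :: t) :: pvGroupsA r s := by rw [pvGroupsA]
    simp only [PySem.List.enumerate_cons, List.foldl_cons, stepx, e2, List.foldl_append,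
      pv_fold_sent s t hsent]
    rw [show (i + ((x :: xs).length : Int)) = (i + 1 + t.length) + r.length by
      push_cast [List.length_cons]; omega]
    simp only at hmain
    rw [hmain, hga]
    simp only [List.foldl_cons, pvStepA]
    have h1 : (i + 1 + (t.length : Int)) = i + ((x :: t).length : Int) := by
      push_cast [List.length_cons]; ring
    have h2 : (i + 1 + (t.length : Int) - i) = ((x :: t).length : Int) := by
      push_cast [List.length_cons]; ring
    rw [h2, h1]

-- per-level equality
theorem pv_level (s : String) (lev : List String) :
    (((pvGroupsA lev s).foldl pvStepA (0, PySem.Dict.empty)).2).items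
    = (let p := (PySem.List.enumerate lev 0).foldl (pvStepB s) (PySem.Dict.empty, 0)
       if lev.isEmpty then p.1.items
       else (p.1.insert p.2 ((lev.length : Int) - p.2)).items) := by
  match lev with
  | [] => simp [pvGroupsA, PySem.List.enumerate_nil]
  | x :: xs =>
    set t := xs.takeWhile (fun y => y == s) with ht
    set r := xs.dropWhile (fun y => y == s) with hr
    have hsplit : t ++ r = xs := List.takeWhile_append_dropWhile
    have hl2 : xs.length = t.length + r.length := by
      rw [← hsplit, List.length_append]
    have hsent : ∀ y ∈ t, y = s := by
      intro y hy; have := List.mem_takeWhile_imp hy; simpa using this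
    have hhead' : ∀ y, r.head? = some y → y ≠ s := by
      intro y hy
      have := pv_head_dropWhile (fun y => y == s) xs y (by simpa [hr] using hy)
      simpa using this
    have hmain := pv_main s r hhead' (1 + t.length) 0 PySem.Dict.empty
      (by omega) (by omega) (by simp [PySem.Dict.keys_empty])
    have e2 : PySem.List.enumerate xs 1
        = PySem.List.enumerate t 1 ++ PySem.List.enumerate r (1 + t.length) := by
      conv_lhs => rw [← hsplit]
      rw [PySem.List.enumerate_append]
    have step0 : pvStepB s (PySem.Dict.empty, 0) (0, x) = (PySem.Dict.empty, 0) := by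
      simp [pvStepB]
    have hga : pvGroupsA (x :: xs) s = (x :: t) :: pvGroupsA r s := by rw [pvGroupsA]
    simp only [PySem.List.enumerate_cons, List.foldl_cons, step0, List.isEmpty_cons,
      Bool.false_eq_true, if_false, zero_add, e2, List.foldl_append,
      pv_fold_sent s t hsent, hga, pvStepA]
    rw [show (((x :: xs).length : Int)) = 1 + ↑t.length + ↑r.length by simp only [List.length_cons]; push_cast; omega]
    rw [show (((x :: t).length : Int)) = 1 + ↑t.length by simp only [List.length_cons]; push_cast; omega]
    simp only [sub_zero] at hmain
    exact hmain.symm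
-- ===== VERDICT (by name: the statement is the Claim_ definition above) =====
theorem get_level_lengths_py_spec : Claim_equal_get_level_lengths_py := by
  intro levels sentinal _
  unfold Spec_get_level_lengths_py get_level_lengths_py get_level_lengths_py_alt
  exact List.map_congr_left (fun lev _ => pv_level sentinal lev)
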